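-- pv_equiv track=rewrite | github.com/nameearly/Miya | webnet/ToolNet/tools/terminal/nlp_parser.py | _check_direct_command
-- ===== SOURCE A (Python) =====
-- from typing import Optional, Dict, List, Tuple
--
-- def _check_direct_command(text: str) -> Optional[str]:
--     """
--     检查是否是直接的终端命令
--
--     Args:
--         text: 输入文本
--
--     Returns:
--         Optional[str]: 如果是直接命令则返回命令本身，否则返回 None
--     """
--     # 常见的 Linux/Windows 命令列表
--     direct_commands = {
--         # 文件操作
--         'ls', 'll', 'la', 'dir',
--         'pwd', 'cd',
--         'cat', 'less', 'more', 'head', 'tail',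
--         'cp', 'copy', 'mv', 'move', 'rm', 'del', 'rmdir',
--         'mkdir', 'md', 'touch', 'echo',
--
--         # 系统信息
--         'ps', 'top', 'htop',
--         'df', 'du', 'free',
--         'uname', 'hostname',
--         'whoami', 'who', 'w',
--
--         # 网络
--         'ping', 'ifconfig', 'ipconfig', 'netstat',
--         'curl', 'wget', 'ssh', 'scp',
--
--         # Git
--         'git', 'clone', 'push', 'pull', 'status', 'log',
--
--         # 开发工具
--         'python', 'python3', 'pip', 'pip3',
--         'npm', 'node', 'yarn', 'pnpm',
--         'docker', 'docker-compose',
--         'grep', 'find', 'locate', 'which', 'where',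
--
--         # 文本处理
--         'wc', 'sort', 'uniq', 'cut', 'awk', 'sed',
--
--         # 压缩解压
--         'tar', 'zip', 'unzip', 'gzip', 'gunzip',
--
--         # 权限管理
--         'chmod', 'chown', 'sudo', 'su',
--
--         # 其他
--         'man', 'help', 'clear', 'cls',
--
--         # 应用程序
--         'firefox', 'chrome', 'google-chrome', 'edge', 'msedge',
--         'notepad', 'code', 'vim', 'nano', 'gedit',
--         'explorer', 'nautilus', 'dolphin', 'thunar',
--         'vlc', 'mpv', 'spotify', 'discord',
--     }
--
--     # 检查是否是单个命令
--     if text in direct_commands: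
--         return text
--
--     # 检查是否以已知命令开头（支持带参数的命令）
--     for cmd in direct_commands:
--         if text.startswith(cmd + ' '):
--             return text
--
--     # 检查是否是带连字符的命令（如 ls -la）
--     parts = text.split()
--     if parts and parts[0] in direct_commands:
--         return text
--
--     return None
-- ===== SOURCE B (Python) =====
-- from typing import Optional
--
-- _COMMANDS = frozenset(
--     "ls ll la dir pwd cd cat less more head tail "
--     "cp copy mv move rm del rmdir mkdir md touch echo "
--     "ps top htop df du free uname hostname whoami who w "
--     "ping ifconfig ipconfig netstat curl wget ssh scp "
--     "git clone push pull status log "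
--     "python python3 pip pip3 npm node yarn pnpm "
--     "docker docker-compose grep find locate which where "
--     "wc sort uniq cut awk sed "
--     "tar zip unzip gzip gunzip chmod chown sudo su "
--     "man help clear cls "
--     "firefox chrome google-chrome edge msedge "
--     "notepad code vim nano gedit "
--     "explorer nautilus dolphin thunar vlc mpv spotify discord".split()
-- )
--
--
-- def _check_direct_command(text: str) -> Optional[str]:
--     """Return text if its first whitespace-separated token is a known command, else None.
--
--     Scans the string once: skip leading whitespace, then take the maximal run of
--     non-whitespace characters as the first token; no full split of the input.
--     """
--     i, n = 0, len(text)
--     while i < n and text[i].isspace():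
--         i += 1
--     j = i
--     while j < n and not text[j].isspace():
--         j += 1
--     return text if j > i and text[i:j] in _COMMANDS else None
-- ===== Notes on version B (the rewrite author's own statement) =====
-- stated objective: simpler
-- what changed: Replaces A's three-stage check (exact set membership, a linear scan over all 99 commands testing a command-plus-space prefix, then a full split with a first-token lookup) by a single character scan that extracts just the first whitespace-delimited token and does one set lookup on it; the command set is built once from a space-separated string.
import Mathlib
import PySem

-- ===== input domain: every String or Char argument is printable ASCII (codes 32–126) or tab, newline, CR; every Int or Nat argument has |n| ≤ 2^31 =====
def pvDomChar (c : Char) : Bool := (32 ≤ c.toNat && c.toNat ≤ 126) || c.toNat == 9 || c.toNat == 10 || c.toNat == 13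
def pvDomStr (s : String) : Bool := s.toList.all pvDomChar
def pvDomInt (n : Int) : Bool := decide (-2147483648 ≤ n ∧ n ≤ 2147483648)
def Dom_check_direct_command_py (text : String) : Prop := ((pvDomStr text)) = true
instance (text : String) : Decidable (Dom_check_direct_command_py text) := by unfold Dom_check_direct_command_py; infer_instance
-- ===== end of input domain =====

-- B replaces A's exact-match check, per-command startswith scan and full split by one
-- character scan that extracts the first token and looks it up once (objective: simpler);
-- the recognized command set and all return values are identical.

-- ===== PORT A =====
-- the set literal of A, in source order (all 99 entries are distinct)
def directCommands : List String :=
  ["ls", "ll", "la", "dir", "pwd", "cd", "cat", "less", "more", "head", "tail",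
   "cp", "copy", "mv", "move", "rm", "del", "rmdir", "mkdir", "md", "touch", "echo",
   "ps", "top", "htop", "df", "du", "free", "uname", "hostname", "whoami", "who", "w",
   "ping", "ifconfig", "ipconfig", "netstat", "curl", "wget", "ssh", "scp",
   "git", "clone", "push", "pull", "status", "log",
   "python", "python3", "pip", "pip3", "npm", "node", "yarn", "pnpm",
   "docker", "docker-compose", "grep", "find", "locate", "which", "where",
   "wc", "sort", "uniq", "cut", "awk", "sed",
   "tar", "zip", "unzip", "gzip", "gunzip", "chmod", "chown", "sudo", "su",
   "man", "help", "clear", "cls",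
   "firefox", "chrome", "google-chrome", "edge", "msedge",
   "notepad", "code", "vim", "nano", "gedit",
   "explorer", "nautilus", "dolphin", "thunar", "vlc", "mpv", "spotify", "discord"]

def check_direct_command_py (text : String) : Option String :=
  -- if text in direct_commands: return text
  if directCommands.contains text then some text
  -- for cmd in direct_commands: if text.startswith(cmd + ' '): return text
  else if directCommands.any (fun cmd => PySem.Str.startswith text (cmd ++ " ")) then some text
  -- parts = text.split(); if parts and parts[0] in direct_commands: return text; return None
  else
    match PySem.Str.split₀ text with
    | [] => none
    | p0 :: _ => if directCommands.contains p0 then some text else none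

-- ===== PORT B =====
-- _COMMANDS = frozenset("ls ll la ...".split())
def directCommandsAlt : List String :=
  PySem.Str.split₀
    ("ls ll la dir pwd cd cat less more head tail cp copy mv move rm del rmdir mkdir md touch echo ps top htop df du free uname hostname whoami who w ping ifconfig ipconfig netstat curl wget ssh scp git clone push pull status log python python3 pip pip3 npm node yarn pnpm docker docker-compose grep find locate which where wc sort uniq cut awk sed tar zip unzip gzip gunzip chmod chown sudo su man help clear cls firefox chrome google-chrome edge msedge notepad code vim nano gedit explorer nautilus dolphin thunar vlc mpv spotify discord")

-- while i < n and text[i].isspace(): i += 1   (skip the leading-whitespace run)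
def skipWhileSpace : List Char → List Char
  | [] => []
  | c :: r => if PySem.Chars.isspace c then skipWhileSpace r else c :: r

-- while j < n and not text[j].isspace(): j += 1   (take the first non-whitespace run)
def takeWhileWord : List Char → List Char
  | [] => []
  | c :: r => if PySem.Chars.isspace c then [] else c :: takeWhileWord r

def check_direct_command_py_alt (text : String) : Option String :=
  -- text[i:j] = the first token obtained by the two index scans
  let tok := takeWhileWord (skipWhileSpace text.toList)
  -- return text if j > i and text[i:j] in _COMMANDS else None
  if !tok.isEmpty && directCommandsAlt.contains (String.ofList tok) then some text else none

-- ===== PRECONDITION & SPEC =====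
def Spec_check_direct_command_py (text : String) (out : Option String) : Prop := out = check_direct_command_py_alt text
instance (text : String) (out : Option String) : Decidable (Spec_check_direct_command_py text out) := by unfold Spec_check_direct_command_py; infer_instance

-- ===== CLAIM (what is proved, stated in full; the proofs are below) =====
def Claim_equal_check_direct_command_py : Prop := ∀ (text : String), Dom_check_direct_command_py text → Spec_check_direct_command_py text (check_direct_command_py text)

-- ===== LEMMAS AND PROOFS =====

-- B's command set is A's command set (same words in the same order)
set_option maxRecDepth 20000 in
set_option maxHeartbeats 2000000 in
theorem directCommandsAlt_eq : directCommandsAlt = directCommands := by decide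

-- every command is a nonempty word with no whitespace characters
theorem directCommands_words :
    ∀ s ∈ directCommands, s.toList ≠ [] ∧ s.toList.all (fun c => !PySem.Chars.isspace c) = true := by
  decide

-- the remainder after the first word (proof-side helper)
def dropWord : List Char → List Char
  | [] => []
  | c :: r => if PySem.Chars.isspace c then c :: r else dropWord r

theorem takeWord_append_dropWord (l : List Char) : takeWhileWord l ++ dropWord l = l := by
  induction l with
  | nil => rfl
  | cons c r ih =>
    simp only [takeWhileWord, dropWord]
    split_ifs <;> simp [ih]

theorem takeWord_all (l : List Char) :
    (takeWhileWord l).all (fun c => !PySem.Chars.isspace c) = true := by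
  induction l with
  | nil => rfl
  | cons c r ih =>
    simp only [takeWhileWord]
    split_ifs with h <;> simp_all

theorem dropWord_space (l : List Char) :
    dropWord l = [] ∨ ∃ c r, dropWord l = c :: r ∧ PySem.Chars.isspace c = true := by
  induction l with
  | nil => exact .inl rfl
  | cons c r ih =>
    simp only [dropWord]
    split_ifs with h
    · exact .inr ⟨c, r, rfl, h⟩
    · exact ih

theorem skip_space (l : List Char) :
    skipWhileSpace l = [] ∨
      ∃ c r, skipWhileSpace l = c :: r ∧ PySem.Chars.isspace c = false := by
  induction l with
  | nil => exact .inl rfl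
  | cons c r ih =>
    simp only [skipWhileSpace]
    split_ifs with h
    · exact ih
    · exact .inr ⟨c, r, rfl, by simpa using h⟩

-- a word of non-space characters passes through takeWhileWord
theorem takeWord_word (w s : List Char)
    (hw : w.all (fun c => !PySem.Chars.isspace c) = true) :
    takeWhileWord (w ++ s) = w ++ takeWhileWord s := by
  induction w with
  | nil => rfl
  | cons c w' ih =>
    simp only [List.all_cons, Bool.and_eq_true, Bool.not_eq_true'] at hw
    simp only [List.cons_append, takeWhileWord, hw.1, Bool.false_eq_true, if_false]
    rw [ih hw.2]

theorem skip_nonspace (c : Char) (r : List Char) (h : PySem.Chars.isspace c = false) :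
    skipWhileSpace (c :: r) = c :: r := by
  simp [skipWhileSpace, h]

-- accumulator lemma for split₀.go
theorem split0_go_acc (s : List Char) (cur : List Char) (acc : List (List Char)) :
    PySem.Chars.split₀.go s cur acc = acc.reverse ++ PySem.Chars.split₀.go s cur [] := by
  induction s generalizing cur acc with
  | nil =>
    simp only [PySem.Chars.split₀.go]
    split_ifs <;> simp
  | cons c rest ih =>
    simp only [PySem.Chars.split₀.go]
    split_ifs with h1 h2
    · rw [ih [] acc]
    · rw [ih [] (cur.reverse :: acc), ih [] [cur.reverse]]
      simp
    · exact ih (c :: cur) acc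

-- a run of non-space characters is consumed into cur
theorem split0_go_word (w s : List Char) (cur : List Char) (acc : List (List Char))
    (hw : w.all (fun c => !PySem.Chars.isspace c) = true) :
    PySem.Chars.split₀.go (w ++ s) cur acc = PySem.Chars.split₀.go s (w.reverse ++ cur) acc := by
  induction w generalizing cur with
  | nil => simp
  | cons c w' ih =>
    simp only [List.all_cons, Bool.and_eq_true, Bool.not_eq_true'] at hw
    simp only [List.cons_append, PySem.Chars.split₀.go, hw.1, Bool.false_eq_true, if_false]
    rw [ih _ hw.2]
    simp

-- go skips leading whitespace when cur is empty
theorem split0_go_skip (l : List Char) (acc : List (List Char)) :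
    PySem.Chars.split₀.go l [] acc = PySem.Chars.split₀.go (skipWhileSpace l) [] acc := by
  induction l with
  | nil => rfl
  | cons c r ih =>
    simp only [skipWhileSpace]
    split_ifs with h
    · simp only [PySem.Chars.split₀.go, h, if_true, List.isEmpty_nil]
      exact ih
    · rfl

-- split₀'s head is exactly B's first token
theorem split0_head (l : List Char) :
    (takeWhileWord (skipWhileSpace l) = [] ∧ PySem.Chars.split₀ l = []) ∨
      (∃ t, PySem.Chars.split₀ l = takeWhileWord (skipWhileSpace l) :: t ∧
        takeWhileWord (skipWhileSpace l) ≠ []) := by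
  unfold PySem.Chars.split₀
  rw [split0_go_skip]
  rcases skip_space l with h | ⟨c, r, h, hc⟩
  · left
    rw [h]
    exact ⟨rfl, rfl⟩
  · right
    rw [h]
    have hd : takeWhileWord (c :: r) ++ dropWord (c :: r) = c :: r :=
      takeWord_append_dropWord (c :: r)
    have hw : (takeWhileWord (c :: r)).all (fun c => !PySem.Chars.isspace c) = true :=
      takeWord_all (c :: r)
    have hne : takeWhileWord (c :: r) ≠ [] := by
      simp [takeWhileWord, hc]
    have hgo : PySem.Chars.split₀.go (c :: r) [] [] =
        PySem.Chars.split₀.go (dropWord (c :: r)) ((takeWhileWord (c :: r)).reverse ++ []) [] := by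
      conv_lhs => rw [← hd]
      exact split0_go_word _ _ _ _ hw
    simp only [List.append_nil] at hgo
    rw [hgo]
    rcases dropWord_space (c :: r) with hdw | ⟨c', r', hdw, hc'⟩
    · rw [hdw]
      simp only [PySem.Chars.split₀.go, List.isEmpty_iff,
        List.reverse_eq_nil_iff, hne, if_false, List.reverse_reverse]
      exact ⟨[], rfl, hne⟩
    · rw [hdw]
      simp only [PySem.Chars.split₀.go, hc', if_true, List.isEmpty_iff,
        List.reverse_eq_nil_iff, hne, if_false]
      rw [split0_go_acc r' [] [(takeWhileWord (c :: r)).reverse.reverse]]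
      simp only [List.reverse_reverse, List.reverse_cons, List.reverse_nil, List.nil_append,
        List.cons_append]
      exact ⟨_, rfl, hne⟩

-- B's value when text's first token is a known command cmd (cmd alone, or cmd followed by a space)
theorem alt_of_firstTok (text : String) (cmd : String) (h : cmd ∈ directCommands)
    (htok : takeWhileWord (skipWhileSpace text.toList) = cmd.toList) :
    check_direct_command_py_alt text = some text := by
  have hw := directCommands_words cmd h
  unfold check_direct_command_py_alt
  rw [htok]
  show (if (!cmd.toList.isEmpty && directCommandsAlt.contains (String.ofList cmd.toList)) = true
      then some text else none) = some text
  have hmem : cmd ∈ directCommandsAlt := by rw [directCommandsAlt_eq]; exact h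
  simp [hmem, hw.1]

theorem firstTok_of_mem (text : String) (h : text ∈ directCommands) :
    takeWhileWord (skipWhileSpace text.toList) = text.toList := by
  have hw := directCommands_words text h
  obtain ⟨c, r, hcr⟩ : ∃ c r, text.toList = c :: r := by
    cases hl : text.toList with
    | nil => exact absurd hl hw.1
    | cons c r => exact ⟨c, r, rfl⟩
  have hall := hw.2
  rw [hcr] at hall ⊢
  simp only [List.all_cons, Bool.and_eq_true, Bool.not_eq_true'] at hall
  rw [skip_nonspace c r hall.1]
  have := takeWord_word (c :: r) [] (by simp [hall.1, hall.2])
  simpa [takeWhileWord] using this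

theorem firstTok_of_startswith (text cmd : String) (h : cmd ∈ directCommands)
    (hs : PySem.Str.startswith text (cmd ++ " ") = true) :
    takeWhileWord (skipWhileSpace text.toList) = cmd.toList := by
  have hw := directCommands_words cmd h
  have hpre : (cmd ++ " ").toList <+: text.toList :=
    (PySem.Chars.startswith_iff text.toList (cmd ++ " ").toList).mp (by simpa using hs)
  obtain ⟨rest, hrest⟩ := hpre
  have hlist : text.toList = cmd.toList ++ ' ' :: rest := by
    rw [← hrest]; simp
  obtain ⟨c, r, hcr⟩ : ∃ c r, cmd.toList = c :: r := by
    cases hl : cmd.toList with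
    | nil => exact absurd hl hw.1
    | cons c r => exact ⟨c, r, rfl⟩
  have hall := hw.2
  rw [hcr] at hall
  simp only [List.all_cons, Bool.and_eq_true, Bool.not_eq_true'] at hall
  rw [hlist, hcr, List.cons_append, skip_nonspace c _ hall.1, ← List.cons_append, ← hcr]
  rw [takeWord_word _ _ hw.2]
  have : takeWhileWord (' ' :: rest) = [] := by
    simp [takeWhileWord, show PySem.Chars.isspace ' ' = true from by decide]
  simp [this]

-- ===== VERDICT (by name: the statement is the Claim_ definition above) =====
theorem check_direct_command_py_spec : Claim_equal_check_direct_command_py := by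
  intro text _
  unfold Spec_check_direct_command_py check_direct_command_py
  split_ifs with h1 h2
  · exact (alt_of_firstTok text text (by simpa using h1)
      (firstTok_of_mem text (by simpa using h1))).symm
  · obtain ⟨cmd, hmem, hsw⟩ := List.any_eq_true.mp h2
    exact (alt_of_firstTok text cmd hmem
      (firstTok_of_startswith text cmd hmem (by simpa using hsw))).symm
  · rcases split0_head text.toList with ⟨htok, hsp⟩ | ⟨t, hsp, hne⟩
    · simp only [PySem.Str.split₀, hsp, List.map_nil]
      unfold check_direct_command_py_alt
      simp [htok]
    · simp only [PySem.Str.split₀, hsp, List.map_cons]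
      unfold check_direct_command_py_alt
      rw [directCommandsAlt_eq]
      simp [hne]
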